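-- pv_equiv track=rewrite | github.com/Rkn21/ha_context_exporter | custom_components/ha_context_exporter/export_logic.py | _split_top_level_yaml_list
-- ===== SOURCE A (Python) =====
-- def _split_top_level_yaml_list(raw: str) -> list[str]:
--     blocks: list[list[str]] = []
--     current: list[str] = []
--
--     for line in raw.splitlines():
--         if line.startswith("- "):
--             if current:
--                 blocks.append(current)
--             current = [line]
--             continue
--         if current:
--             current.append(line)
--
--     if current:
--         blocks.append(current)
--
--     return ["\n".join(block).strip() for block in blocks if any(part.strip() for part in block)]
-- ===== SOURCE B (Python) =====
-- def _split_top_level_yaml_list(raw: str) -> list[str]: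
--     # back-to-front single pass: walk the lines in reverse, gathering the tail
--     # of each block until its "- " marker line is reached, emitting as we go
--     out: list[str] = []
--     tail: list[str] = []
--     for line in reversed(raw.splitlines()):
--         if line.startswith("- "):
--             block = [line] + tail
--             if any(part.strip() for part in block):
--                 out.append("\n".join(block).strip())
--             tail = []
--         else:
--             tail = [line] + tail
--     out.reverse()
--     return out
-- ===== Notes on version B (the rewrite author's own statement) =====
-- stated objective: alternative
-- what changed: B builds the result back-to-front in a single reversed pass that emits each finished block the moment its '- ' marker line is reached (no blocks-of-lists accumulator, no end-of-loop flush, no separate filter/join comprehension), then reverses the output, instead of A's forward pass with a pending-block buffer plus a final comprehension.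
import Mathlib
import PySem

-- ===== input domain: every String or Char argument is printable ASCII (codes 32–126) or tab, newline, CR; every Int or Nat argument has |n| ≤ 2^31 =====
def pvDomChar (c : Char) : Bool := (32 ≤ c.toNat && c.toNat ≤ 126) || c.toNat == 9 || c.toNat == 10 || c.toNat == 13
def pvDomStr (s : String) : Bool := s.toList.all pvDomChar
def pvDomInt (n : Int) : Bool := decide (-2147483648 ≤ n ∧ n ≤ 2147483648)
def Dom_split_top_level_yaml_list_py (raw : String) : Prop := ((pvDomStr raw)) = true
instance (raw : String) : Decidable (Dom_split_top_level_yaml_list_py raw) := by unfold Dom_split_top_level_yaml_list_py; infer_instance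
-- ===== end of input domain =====

-- B builds the result back-to-front in one reversed pass, emitting each block at its "- "
-- marker, instead of A's forward pass with a pending buffer plus a final comprehension
-- (objective: alternative decomposition; same cost).


-- ===== PORT A =====
-- the body of A's for-loop, on state (blocks, current)
def pvStepA (st : List (List String) × List String) (line : String) :
    List (List String) × List String :=
  if PySem.Str.startswith line "- " then
    ((if st.2 = [] then st.1 else st.1 ++ [st.2]), [line])
  else if st.2 = [] then st else (st.1, st.2 ++ [line])

def split_top_level_yaml_list_py (raw : String) : List String :=
  let st := (PySem.Str.splitlines raw).foldl pvStepA ([], [])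
  let blocks := if st.2 = [] then st.1 else st.1 ++ [st.2]
  (blocks.filter (fun block => block.any (fun p => PySem.Str.strip p != ""))).map
    (fun block => PySem.Str.strip (PySem.Str.join "\n" block))

-- ===== PORT B =====
-- the body of B's for-loop over the reversed lines, on state (out, tail)
def pvStepB (st : List String × List String) (line : String) :
    List String × List String :=
  if PySem.Str.startswith line "- " then
    let block := line :: st.2
    ((if block.any (fun p => PySem.Str.strip p != "") then
        st.1 ++ [PySem.Str.strip (PySem.Str.join "\n" block)]
      else st.1), [])
  else (st.1, line :: st.2)

def split_top_level_yaml_list_py_alt (raw : String) : List String :=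
  (((PySem.Str.splitlines raw).reverse.foldl pvStepB ([], [])).1).reverse

-- ===== PRECONDITION & SPEC =====
def Spec_split_top_level_yaml_list_py (raw : String) (out : List String) : Prop := out = split_top_level_yaml_list_py_alt raw
instance (raw : String) (out : List String) : Decidable (Spec_split_top_level_yaml_list_py raw out) := by unfold Spec_split_top_level_yaml_list_py; infer_instance

-- ===== CLAIM (what is proved, stated in full; the proofs are below) =====
def Claim_equal_split_top_level_yaml_list_py : Prop := ∀ (raw : String), Dom_split_top_level_yaml_list_py raw → Spec_split_top_level_yaml_list_py raw (split_top_level_yaml_list_py raw)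

-- ===== LEMMAS AND PROOFS =====

def pvMarker (l : String) : Bool := PySem.Str.startswith l "- "
def pvKeep (b : List String) : Bool := b.any (fun p => PySem.Str.strip p != "")
def pvEmit (b : List String) : String := PySem.Str.strip (PySem.Str.join "\n" b)

-- the list of top-level blocks of a line list (lines before the first marker dropped)
def pvBlocks : List String → List (List String)
  | [] => []
  | l :: ls =>
    if pvMarker l then
      (l :: ls.takeWhile (fun x => !pvMarker x)) :: pvBlocks (ls.dropWhile (fun x => !pvMarker x))
    else pvBlocks ls
termination_by ls => ls.length
decreasing_by
  · exact Nat.lt_succ_of_le (List.length_dropWhile_le _ _)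
  · exact Nat.lt_succ_of_le (Nat.le_refl _)

theorem pvBlocks_dropWhile (ls : List String) :
    pvBlocks (ls.dropWhile (fun x => !pvMarker x)) = pvBlocks ls := by
  induction ls with
  | nil => rfl
  | cons l ls ih =>
    by_cases h : pvMarker l
    · simp [List.dropWhile_cons, h]
    · simp [List.dropWhile_cons, h, pvBlocks, ih]

theorem pvLemA (ls : List String) (bs : List (List String)) (cur : List String) :
    (if (ls.foldl pvStepA (bs, cur)).2 = [] then (ls.foldl pvStepA (bs, cur)).1
     else (ls.foldl pvStepA (bs, cur)).1 ++ [(ls.foldl pvStepA (bs, cur)).2])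
    = bs ++ (if cur = [] then pvBlocks ls
             else (cur ++ ls.takeWhile (fun x => !pvMarker x))
                    :: pvBlocks (ls.dropWhile (fun x => !pvMarker x))) := by
  induction ls generalizing bs cur with
  | nil =>
    by_cases hc : cur = [] <;> simp [hc, pvBlocks]
  | cons l ls ih =>
    by_cases hm : pvMarker l
    · have hstep : pvStepA (bs, cur) l
          = ((if cur = [] then bs else bs ++ [cur]), [l]) := by
        simp [pvStepA, pvMarker] at hm ⊢
        simp [hm]
      rw [List.foldl_cons, hstep, ih]
      by_cases hc : cur = [] <;>
        simp [hc, pvBlocks, hm, List.takeWhile_cons, List.dropWhile_cons]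
    · have hstep : pvStepA (bs, cur) l
          = if cur = [] then (bs, cur) else (bs, cur ++ [l]) := by
        simp [pvStepA, pvMarker] at hm ⊢
        simp [hm]
      rw [List.foldl_cons, hstep]
      by_cases hc : cur = []
      · simp only [hc, if_pos rfl]
        rw [ih]
        simp [pvBlocks, hm]
      · simp only [hc, if_neg hc]
        rw [ih]
        simp [hc, hm, List.takeWhile_cons, List.dropWhile_cons]
  termination_by ls.length

theorem pvStepB_eq (st : List String × List String) (line : String) :
    pvStepB st line =
      if pvMarker line then
        ((if pvKeep (line :: st.2) then st.1 ++ [pvEmit (line :: st.2)] else st.1), [])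
      else (st.1, line :: st.2) := rfl

theorem pvLemB (ls : List String) :
    ls.foldr (fun line st => pvStepB st line) ([], [])
    = ((((pvBlocks ls).filter pvKeep).map pvEmit).reverse,
        ls.takeWhile (fun x => !pvMarker x)) := by
  induction ls with
  | nil => simp [pvBlocks]
  | cons l ls ih =>
    rw [List.foldr_cons, ih, pvStepB_eq]
    by_cases hm : pvMarker l
    · have hb : pvBlocks (l :: ls)
          = (l :: ls.takeWhile (fun x => !pvMarker x)) :: pvBlocks ls := by
        rw [pvBlocks, if_pos hm, pvBlocks_dropWhile]
      rw [hb]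
      by_cases hk : pvKeep (l :: ls.takeWhile (fun x => !pvMarker x)) <;>
        simp [hm, hk, List.filter_cons, List.takeWhile_cons]
    · have hb : pvBlocks (l :: ls) = pvBlocks ls := by
        rw [pvBlocks, if_neg hm]
      simp [hm, hb]

-- ===== VERDICT (by name: the statement is the Claim_ definition above) =====
theorem split_top_level_yaml_list_py_spec : Claim_equal_split_top_level_yaml_list_py := by
  intro raw _
  unfold Spec_split_top_level_yaml_list_py
  unfold split_top_level_yaml_list_py split_top_level_yaml_list_py_alt
  rw [List.foldl_reverse]
  have hB := pvLemB (PySem.Str.splitlines raw)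
  have hA := pvLemA (PySem.Str.splitlines raw) [] []
  simp only [List.nil_append] at hA
  simp only [hB, hA, List.reverse_reverse]
  rfl
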